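-- pv_equiv track=rewrite | github.com/drewhayward/advent-of-code-2015 | day01/paren_floors.py | count_floors
-- ===== SOURCE A (Python) =====
-- def count_floors(s):
--     floor = 0
--     for c in s:
--         if c == '(':
--             floor += 1
--         else:
--             floor -= 1
--
--     return floor
-- ===== SOURCE B (Python) =====
-- def count_floors(s):
--     # closed form: +1 for each '(', -1 for every other char
--     return 2 * s.count('(') - len(s)
-- ===== Notes on version B (the rewrite author's own statement) =====
-- stated objective: simpler
-- what changed: Replaced the per-character loop and branch with the closed form 2*s.count('(') - len(s), since A adds 1 for '(' and subtracts 1 for every other character.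
import Mathlib
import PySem

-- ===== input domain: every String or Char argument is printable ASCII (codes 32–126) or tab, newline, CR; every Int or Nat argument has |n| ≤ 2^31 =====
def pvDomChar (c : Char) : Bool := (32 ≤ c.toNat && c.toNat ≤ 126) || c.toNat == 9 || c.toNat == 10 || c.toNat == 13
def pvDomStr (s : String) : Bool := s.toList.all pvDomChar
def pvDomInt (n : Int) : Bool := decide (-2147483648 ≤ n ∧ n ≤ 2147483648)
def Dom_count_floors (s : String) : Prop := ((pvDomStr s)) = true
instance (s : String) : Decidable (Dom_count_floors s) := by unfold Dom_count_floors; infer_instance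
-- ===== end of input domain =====

-- B replaces A's per-character loop with the closed form 2*count('(') - len(s) (simpler).

-- ===== PORT A =====
-- floor starts at 0; each '(' adds 1, every other character subtracts 1
def count_floors (s : String) : Int :=
  s.toList.foldl (fun floor c => if c == '(' then floor + 1 else floor - 1) 0

-- ===== PORT B =====
def count_floors_alt (s : String) : Int :=
  2 * (PySem.Str.count s "(" : Int) - PySem.Str.len s

-- ===== PRECONDITION & SPEC =====
def Spec_count_floors (s : String) (out : Int) : Prop := out = count_floors_alt s
instance (s : String) (out : Int) : Decidable (Spec_count_floors s out) := by unfold Spec_count_floors; infer_instance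

-- ===== CLAIM (what is proved, stated in full; the proofs are below) =====
def Claim_equal_count_floors : Prop := ∀ (s : String), Dom_count_floors s → Spec_count_floors s (count_floors s)

-- ===== LEMMAS AND PROOFS =====

theorem chars_count_go_singleton (c : Char) (l : List Char) (fuel acc : Nat)
    (h : l.length ≤ fuel) :
    PySem.Chars.count.go [c] fuel l acc = acc + l.count c := by
  induction l generalizing fuel acc with
  | nil => cases fuel <;> simp [PySem.Chars.count.go]
  | cons x t ih =>
    cases fuel with
    | zero => simp at h
    | succ n =>
      simp only [List.length_cons, Nat.add_le_add_iff_right] at h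
      rw [PySem.Chars.count.go]
      by_cases hx : x = c
      · subst hx
        rw [if_pos (by simp [List.isPrefixOf])]
        rw [show List.drop [x].length (x :: t) = t from rfl, ih n (acc + 1) h,
          List.count_cons]
        simp; omega
      · rw [if_neg (by simp [List.isPrefixOf]; exact fun h' => hx h'.symm),
          ih n acc h, List.count_cons]
        simp [hx]

theorem chars_count_singleton (c : Char) (l : List Char) :
    PySem.Chars.count l [c] = l.count c := by
  simp [PySem.Chars.count, List.isEmpty]
  rw [chars_count_go_singleton c l l.length 0 (le_refl _)]
  omega

theorem foldl_floor (l : List Char) (a : Int) :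
    l.foldl (fun floor c => if c == '(' then floor + 1 else floor - 1) a
      = a + 2 * (l.count '(' : Int) - l.length := by
  induction l generalizing a with
  | nil => simp
  | cons x t ih =>
    rw [List.foldl_cons]
    by_cases hx : x = '('
    · rw [if_pos (by simp [hx]), ih, List.count_cons]
      simp [hx]
      ring
    · rw [if_neg (by simp [hx]), ih, List.count_cons]
      simp only [beq_iff_eq, if_neg hx, List.length_cons]
      push_cast
      ring

-- ===== VERDICT (by name: the statement is the Claim_ definition above) =====
theorem count_floors_spec : Claim_equal_count_floors := by
  intro s _
  unfold Spec_count_floors count_floors count_floors_alt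
  rw [foldl_floor]
  simp [PySem.Str.count, PySem.Str.len, chars_count_singleton]
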